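-- pv_equiv track=rewrite | github.com/MichaelZalla/EPIJudge | epi_judge_python/spiral_ordering.py | spiral_boundary
-- ===== SOURCE A (Python) =====
-- import math, itertools
--
-- def spiral_boundary(M, n, level):
--
--     if n == 1:
--
--         return [M[0][0]]
--
--     if n % 2 == 1 and level == math.floor(n / 2):
--
--         value = M[level][level]
--
--         return [value]
--
--     low_bound, high_bound = level, n-level-1
--
--     top = list(M[low_bound][i] for i in range(low_bound, high_bound+1))
--     bottom = list(M[high_bound][i] for i in reversed(range(low_bound, high_bound+1)))
--     right = list(M[i][high_bound] for i in range(low_bound, high_bound+1))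
--     left = list(M[i][low_bound] for i in reversed(range(low_bound, high_bound+1)))
--
--     return top + right[1:-1] + bottom + left[1:-1]
-- ===== SOURCE B (Python) =====
-- def spiral_boundary(M, n, level):
--     if n == 1:
--         return [M[0][0]]
--     if n % 2 == 1 and level == n // 2:
--         return [M[level][level]]
--     low, high = level, n - level - 1
--     out = []
--     r, c = low, low
--     dr, dc = 0, 1
--     for _ in range(4 * (high - low)):
--         out.append(M[r][c])
--         # rotate clockwise when the next cell would leave the ring
--         if not (low <= r + dr <= high and low <= c + dc <= high):
--             dr, dc = dc, -dr
--         r, c = r + dr, c + dc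
--     return out
-- ===== Notes on version B (the rewrite author's own statement) =====
-- stated objective: alternative
-- what changed: Replaces the four per-side list builds plus two slices and three concatenations by one stateful perimeter walk of 4*(high-low) steps that maintains a position and a clockwise-rotating direction vector.
import Mathlib
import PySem

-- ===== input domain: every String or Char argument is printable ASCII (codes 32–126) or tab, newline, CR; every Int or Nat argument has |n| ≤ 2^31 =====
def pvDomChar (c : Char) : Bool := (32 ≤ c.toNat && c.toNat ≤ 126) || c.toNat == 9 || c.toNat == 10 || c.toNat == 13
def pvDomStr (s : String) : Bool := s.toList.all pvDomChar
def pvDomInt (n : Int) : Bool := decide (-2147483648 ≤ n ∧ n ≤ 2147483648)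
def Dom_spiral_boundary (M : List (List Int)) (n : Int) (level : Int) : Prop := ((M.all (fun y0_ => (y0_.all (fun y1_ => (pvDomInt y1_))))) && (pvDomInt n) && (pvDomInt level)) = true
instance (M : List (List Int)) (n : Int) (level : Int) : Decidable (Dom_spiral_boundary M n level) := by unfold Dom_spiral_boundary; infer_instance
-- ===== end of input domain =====

-- B replaces A's four per-side list builds, two slices and the concatenations by a single
-- clockwise perimeter walk maintaining a position and a rotating direction vector (same cost).

-- shared indexing helper: Python M[r][c] (negative indices from the end; valid under Pre_)
def pvCell (M : List (List Int)) (r c : Int) : Int :=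
  PySem.List.pyGetD (PySem.List.pyGetD M r []) c 0

-- ===== PORT A =====
def spiral_boundary (M : List (List Int)) (n : Int) (level : Int) : List Int :=
  if n = 1 then [pvCell M 0 0]
  -- math.floor(n/2) equals n // 2 exactly on |n| ≤ 2^31 (floats are exact below 2^53)
  else if PySem.Int.mod n 2 = 1 ∧ level = PySem.Int.floordiv n 2 then
    [pvCell M level level]
  else
    let low_bound := level
    let high_bound := n - level - 1
    let idx := PySem.List.pyRange low_bound (high_bound + 1) 1
    let top := idx.map (fun i => pvCell M low_bound i)
    let bottom := idx.reverse.map (fun i => pvCell M high_bound i)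
    let right := idx.map (fun i => pvCell M i high_bound)
    let left := idx.reverse.map (fun i => pvCell M i low_bound)
    top ++ PySem.List.slice right (some 1) (some (-1)) ++ bottom
        ++ PySem.List.slice left (some 1) (some (-1))

-- ===== PORT B =====
-- the loop `for _ in range(4*(high-low))` of Source B, one step per fuel unit
def pvWalk (M : List (List Int)) (low high : Int) :
    Int → Int → Int → Int → Nat → List Int
  | _, _, _, _, 0 => []
  | r, c, dr, dc, Nat.succ f =>
    let v := pvCell M r c
    let turn : Bool :=
      !(decide (low ≤ r + dr) && decide (r + dr ≤ high) &&
        decide (low ≤ c + dc) && decide (c + dc ≤ high))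
    let dr' := if turn then dc else dr
    let dc' := if turn then -dr else dc
    v :: pvWalk M low high (r + dr') (c + dc') dr' dc' f

def spiral_boundary_alt (M : List (List Int)) (n : Int) (level : Int) : List Int :=
  if n = 1 then [pvCell M 0 0]
  else if PySem.Int.mod n 2 = 1 ∧ level = PySem.Int.floordiv n 2 then
    [pvCell M level level]
  else
    let low := level
    let high := n - level - 1
    pvWalk M low high low low 0 1 (4 * (high - low)).toNat

-- ===== PRECONDITION & SPEC =====
-- Pre_ = exactly the inputs on which A returns (all Python index accesses in range); A raises
-- IndexError outside it.
def pvRow (M : List (List Int)) (i : Int) : List Int := PySem.List.pyGetD M i []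

def Pre_spiral_boundary (M : List (List Int)) (n : Int) (level : Int) : Prop :=
  if n = 1 then
    PySem.Raise.InRange M.length 0 ∧ PySem.Raise.InRange (pvRow M 0).length 0
  else if PySem.Int.mod n 2 = 1 ∧ level = PySem.Int.floordiv n 2 then
    PySem.Raise.InRange M.length level ∧ PySem.Raise.InRange (pvRow M level).length level
  else if n - level - 1 < level then True  -- empty ring: A touches nothing and returns []
  else
    -- every accessed index in range: rows level..n-level-1 (with Python's negative wrap),
    -- and in each touched row every column level..n-level-1
    (-(M.length : Int) ≤ level ∧ n - level - 1 < (M.length : Int)) ∧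
    ∀ j ∈ List.range M.length,
      ((level ≤ (j : Int) ∧ (j : Int) ≤ n - level - 1) ∨
       (level ≤ (j : Int) - (M.length : Int) ∧ (j : Int) - (M.length : Int) ≤ n - level - 1)) →
      (-(((pvRow M (j : Int)).length : Int)) ≤ level ∧
        n - level - 1 < ((pvRow M (j : Int)).length : Int))

instance (M : List (List Int)) (n : Int) (level : Int) : Decidable (Pre_spiral_boundary M n level) := by
  unfold Pre_spiral_boundary; infer_instance

def pvWitness_spiral_boundary : List (List Int) × Int × Int := ([[1, 2], [3, 4]], 2, 0)

def Spec_spiral_boundary (M : List (List Int)) (n : Int) (level : Int) (out : List Int) : Prop := out = spiral_boundary_alt M n level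
instance (M : List (List Int)) (n : Int) (level : Int) (out : List Int) : Decidable (Spec_spiral_boundary M n level out) := by unfold Spec_spiral_boundary; infer_instance

-- ===== CLAIM (what is proved, stated in full; the proofs are below) =====
def Claim_equal_spiral_boundary : Prop := ∀ (M : List (List Int)) (n : Int) (level : Int), Dom_spiral_boundary M n level → Pre_spiral_boundary M n level → Spec_spiral_boundary M n level (spiral_boundary M n level)

-- ===== LEMMAS AND PROOFS =====

-- straight run east along the top row
lemma pvWalk_east (M : List (List Int)) (lo hi : Int) (hlh : lo < hi) :
    ∀ (k : Nat) (c : Int) (m : Nat), lo ≤ c → c + k = hi →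
    pvWalk M lo hi lo c 0 1 (k + m) =
      (List.range k).map (fun i : Nat => pvCell M lo (c + (i : Int))) ++ pvWalk M lo hi lo hi 0 1 m := by
  intro k
  induction k with
  | zero => intro c m h1 h2; simp at h2; simp [h2]
  | succ k ih =>
    intro c m h1 h2
    have hstep : c + 1 ≤ hi := by push_cast at h2; omega
    rw [show k + 1 + m = Nat.succ (k + m) from by omega, pvWalk]
    simp only [add_zero, neg_zero]
    have hturn : (!(decide (lo ≤ lo) && decide (lo ≤ hi) &&
        decide (lo ≤ c + 1) && decide (c + 1 ≤ hi))) = false := by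
      simp; omega
    simp only [hturn, Bool.false_eq_true, if_false, add_zero]
    rw [ih (c + 1) m (by omega) (by push_cast at h2 ⊢; omega)]
    rw [List.range_succ_eq_map]
    simp only [List.map_cons, List.map_map, List.cons_append]
    congr 1
    · simp
    · congr 1
      apply List.map_congr_left
      intro i _
      simp only [Function.comp]
      congr 1
      push_cast
      ring

-- straight run south along the right column
lemma pvWalk_south (M : List (List Int)) (lo hi : Int) (hlh : lo < hi) :
    ∀ (k : Nat) (r : Int) (m : Nat), lo ≤ r → r + k = hi →
    pvWalk M lo hi r hi 1 0 (k + m) =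
      (List.range k).map (fun i : Nat => pvCell M (r + (i : Int)) hi) ++ pvWalk M lo hi hi hi 1 0 m := by
  intro k
  induction k with
  | zero => intro r m h1 h2; simp at h2; simp [h2]
  | succ k ih =>
    intro r m h1 h2
    have hstep : r + 1 ≤ hi := by push_cast at h2; omega
    rw [show k + 1 + m = Nat.succ (k + m) from by omega, pvWalk]
    simp only [add_zero, neg_zero]
    have hturn : (!(decide (lo ≤ r + 1) && decide (r + 1 ≤ hi) &&
        decide (lo ≤ hi) && decide (hi ≤ hi))) = false := by
      simp; omega
    simp only [hturn, Bool.false_eq_true, if_false, add_zero]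
    rw [ih (r + 1) m (by omega) (by push_cast at h2 ⊢; omega)]
    rw [List.range_succ_eq_map]
    simp only [List.map_cons, List.map_map, List.cons_append]
    congr 1
    · simp
    · congr 1
      apply List.map_congr_left
      intro i _
      simp only [Function.comp]
      congr 1
      push_cast
      ring

-- straight run west along the bottom row
lemma pvWalk_west (M : List (List Int)) (lo hi : Int) (hlh : lo < hi) :
    ∀ (k : Nat) (c : Int) (m : Nat), c ≤ hi → c - k = lo →
    pvWalk M lo hi hi c 0 (-1) (k + m) =
      (List.range k).map (fun i : Nat => pvCell M hi (c - (i : Int))) ++ pvWalk M lo hi hi lo 0 (-1) m := by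
  intro k
  induction k with
  | zero => intro c m h1 h2; simp at h2; simp [h2]
  | succ k ih =>
    intro c m h1 h2
    have hstep : lo ≤ c - 1 := by push_cast at h2; omega
    rw [show k + 1 + m = Nat.succ (k + m) from by omega, pvWalk]
    simp only [add_zero, neg_zero]
    have hturn : (!(decide (lo ≤ hi) && decide (hi ≤ hi) &&
        decide (lo ≤ c + -1) && decide (c + -1 ≤ hi))) = false := by
      simp; omega
    simp only [hturn, Bool.false_eq_true, if_false, add_zero]
    rw [show c + -1 = c - 1 from by ring]
    rw [ih (c - 1) m (by omega) (by push_cast at h2 ⊢; omega)]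
    rw [List.range_succ_eq_map]
    simp only [List.map_cons, List.map_map, List.cons_append]
    congr 1
    · simp
    · congr 1
      apply List.map_congr_left
      intro i _
      simp only [Function.comp]
      congr 1
      push_cast
      ring

-- straight run north along the left column
lemma pvWalk_north (M : List (List Int)) (lo hi : Int) (hlh : lo < hi) :
    ∀ (k : Nat) (r : Int) (m : Nat), r ≤ hi → r - k = lo →
    pvWalk M lo hi r lo (-1) 0 (k + m) =
      (List.range k).map (fun i : Nat => pvCell M (r - (i : Int)) lo) ++ pvWalk M lo hi lo lo (-1) 0 m := by
  intro k
  induction k with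
  | zero => intro r m h1 h2; simp at h2; simp [h2]
  | succ k ih =>
    intro r m h1 h2
    have hstep : lo ≤ r - 1 := by push_cast at h2; omega
    rw [show k + 1 + m = Nat.succ (k + m) from by omega, pvWalk]
    simp only [add_zero, neg_zero]
    have hturn : (!(decide (lo ≤ r + -1) && decide (r + -1 ≤ hi) &&
        decide (lo ≤ lo) && decide (lo ≤ hi))) = false := by
      simp; omega
    simp only [hturn, Bool.false_eq_true, if_false, add_zero]
    rw [show r + -1 = r - 1 from by ring]
    rw [ih (r - 1) m (by omega) (by push_cast at h2 ⊢; omega)]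
    rw [List.range_succ_eq_map]
    simp only [List.map_cons, List.map_map, List.cons_append]
    congr 1
    · simp
    · congr 1
      apply List.map_congr_left
      intro i _
      simp only [Function.comp]
      congr 1
      push_cast
      ring

-- the three corner turns
lemma pvWalk_corner_ne (M : List (List Int)) (lo hi : Int) (hlh : lo < hi) (m : Nat) :
    pvWalk M lo hi lo hi 0 1 (Nat.succ m) =
      pvCell M lo hi :: pvWalk M lo hi (lo + 1) hi 1 0 m := by
  rw [pvWalk]
  simp only [add_zero, neg_zero]
  have hturn : (!(decide (lo ≤ lo) && decide (lo ≤ hi) &&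
      decide (lo ≤ hi + 1) && decide (hi + 1 ≤ hi))) = true := by simp
  simp only [hturn, if_true, neg_zero, add_zero]

lemma pvWalk_corner_se (M : List (List Int)) (lo hi : Int) (hlh : lo < hi) (m : Nat) :
    pvWalk M lo hi hi hi 1 0 (Nat.succ m) =
      pvCell M hi hi :: pvWalk M lo hi hi (hi - 1) 0 (-1) m := by
  rw [pvWalk]
  simp only [add_zero, neg_zero]
  have hturn : (!(decide (lo ≤ hi + 1) && decide (hi + 1 ≤ hi) &&
      decide (lo ≤ hi) && decide (hi ≤ hi))) = true := by simp
  simp only [hturn, if_true, neg_zero, add_zero]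
  rw [show hi + -1 = hi - 1 from by ring]

lemma pvWalk_corner_sw (M : List (List Int)) (lo hi : Int) (hlh : lo < hi) (m : Nat) :
    pvWalk M lo hi hi lo 0 (-1) (Nat.succ m) =
      pvCell M hi lo :: pvWalk M lo hi (hi - 1) lo (-1) 0 m := by
  rw [pvWalk]
  simp only [add_zero, neg_zero]
  have hturn : (!(decide (lo ≤ hi) && decide (hi ≤ hi) &&
      decide (lo ≤ lo + -1) && decide (lo + -1 ≤ hi))) = true := by simp
  simp only [hturn, if_true, neg_zero, add_zero]
  rw [show hi + -1 = hi - 1 from by ring]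

-- the full ring as one walk
lemma pvWalk_ring (M : List (List Int)) (lo : Int) (d : Nat) (hd : 1 ≤ d) :
    pvWalk M lo (lo + (d : Int)) lo lo 0 1 (4 * d) =
      (List.range d).map (fun i : Nat => pvCell M lo (lo + (i : Int)))
      ++ [pvCell M lo (lo + (d : Int))]
      ++ (List.range (d - 1)).map (fun i : Nat => pvCell M (lo + 1 + (i : Int)) (lo + (d : Int)))
      ++ [pvCell M (lo + (d : Int)) (lo + (d : Int))]
      ++ (List.range (d - 1)).map (fun i : Nat => pvCell M (lo + (d : Int)) (lo + (d : Int) - 1 - (i : Int)))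
      ++ [pvCell M (lo + (d : Int)) lo]
      ++ (List.range (d - 1)).map (fun i : Nat => pvCell M (lo + (d : Int) - 1 - (i : Int)) lo) := by
  have hlh : lo < lo + d := by push_cast; omega
  have hfuel : 4 * d = d + Nat.succ ((d - 1) + Nat.succ ((d - 1) + Nat.succ (d - 1))) := by omega
  rw [hfuel]
  rw [pvWalk_east M lo (lo + d) hlh d lo _ le_rfl rfl]
  rw [pvWalk_corner_ne M lo (lo + d) hlh]
  rw [pvWalk_south M lo (lo + d) hlh (d - 1) (lo + 1) _ (by omega)
      (by push_cast; omega)]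
  rw [pvWalk_corner_se M lo (lo + d) hlh]
  rw [pvWalk_west M lo (lo + d) hlh (d - 1) (lo + d - 1) _ (by omega)
      (by push_cast; omega)]
  rw [pvWalk_corner_sw M lo (lo + d) hlh]
  have hN := pvWalk_north M lo (lo + d) hlh (d - 1) (lo + d - 1) 0 (by omega)
      (by push_cast; omega)
  rw [Nat.add_zero] at hN
  rw [hN, pvWalk]
  simp only [List.append_assoc, List.append_nil, List.cons_append, List.singleton_append,
    List.nil_append]

-- descending range: (List.range m).reverse entrywise
lemma pv_reverse_range_map {α : Type} (g : Nat → α) (m : Nat) :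
    (List.range m).reverse.map g = (List.range m).map (fun i : Nat => g (m - 1 - i)) := by
  apply List.ext_getElem
  · simp
  intro i h1 h2
  simp only [List.getElem_map, List.getElem_reverse, List.getElem_range, List.length_map,
    List.length_reverse, List.length_range] at h1 h2 ⊢

-- A's slice right[1:-1] on a (d+1)-element map
lemma pv_slice_inner {α : Type} (f : Nat → α) (d : Nat) :
    PySem.List.slice ((List.range (d + 1)).map f) (some 1) (some (-1)) =
      ((List.range (d + 1)).map f).tail.dropLast := by
  have hL : ((List.range (d + 1)).map f).length = d + 1 := by simp
  simp only [PySem.List.slice, PySem.List.clampIdx, hL]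
  norm_num
  rw [List.dropLast_eq_take, List.length_tail, hL, ← List.drop_one]
  congr 1
lemma pv_lo_hi_guard (n level : Int) (h : n - level - 1 = level) :
    PySem.Int.mod n 2 = 1 ∧ level = PySem.Int.floordiv n 2 := by
  have hn : n = 2 * level + 1 := by omega
  constructor
  · rw [PySem.Int.mod_eq_emod_of_pos (by omega : (0:Int) < 2), hn]; omega
  · rw [PySem.Int.floordiv_eq_ediv_of_pos (by omega : (0:Int) < 2), hn]; omega

-- the four pieces of A's return value, in the walk's form
lemma pv_top (M : List (List Int)) (lo : Int) (d : Nat) :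
    (((List.range (d + 1)).map (fun k : Nat => lo + (k : Int))).map
        (fun i => pvCell M lo i)) =
      (List.range d).map (fun i : Nat => pvCell M lo (lo + (i : Int)))
        ++ [pvCell M lo (lo + (d : Int))] := by
  rw [List.range_succ]
  simp [List.map_map, Function.comp]

lemma pv_right (M : List (List Int)) (lo : Int) (d : Nat) (hd : 1 ≤ d) :
    PySem.List.slice (((List.range (d + 1)).map
        (fun k : Nat => lo + (k : Int))).map (fun i => pvCell M i (lo + (d : Int))))
      (some 1) (some (-1)) =
      (List.range (d - 1)).map
        (fun i : Nat => pvCell M (lo + 1 + (i : Int)) (lo + (d : Int))) := by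
  obtain ⟨e, rfl⟩ : ∃ e, d = e + 1 := ⟨d - 1, by omega⟩
  rw [List.map_map, pv_slice_inner]
  rw [List.range_succ_eq_map]
  simp only [List.map_cons, List.tail_cons, List.map_map]
  rw [List.range_succ]
  simp only [List.map_append, List.map_cons, List.map_nil, List.dropLast_concat,
    Nat.add_sub_cancel]
  apply List.map_congr_left
  intro i _
  simp only [Function.comp]
  congr 1
  push_cast
  ring

lemma pv_bot (M : List (List Int)) (lo : Int) (d : Nat) (hd : 1 ≤ d) :
    (((List.range (d + 1)).map (fun k : Nat => lo + (k : Int))).reverse.map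
        (fun i => pvCell M (lo + (d : Int)) i)) =
      [pvCell M (lo + (d : Int)) (lo + (d : Int))]
        ++ (List.range (d - 1)).map
            (fun i : Nat => pvCell M (lo + (d : Int)) (lo + (d : Int) - 1 - (i : Int)))
        ++ [pvCell M (lo + (d : Int)) lo] := by
  obtain ⟨e, rfl⟩ : ∃ e, d = e + 1 := ⟨d - 1, by omega⟩
  rw [← List.map_reverse, List.map_map, pv_reverse_range_map]
  rw [List.range_succ_eq_map]
  simp only [List.map_cons, List.map_map]
  rw [List.range_succ]
  simp only [List.map_append, List.map_cons, List.map_nil, Nat.add_sub_cancel,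
    List.cons_append, List.singleton_append, List.append_assoc, List.nil_append]
  simp only [Function.comp]
  norm_num
  intro a ha
  congr 1
  omega

lemma pv_left (M : List (List Int)) (lo : Int) (d : Nat) (hd : 1 ≤ d) :
    PySem.List.slice (((List.range (d + 1)).map
        (fun k : Nat => lo + (k : Int))).reverse.map (fun i => pvCell M i lo))
      (some 1) (some (-1)) =
      (List.range (d - 1)).map
        (fun i : Nat => pvCell M (lo + (d : Int) - 1 - (i : Int)) lo) := by
  obtain ⟨e, rfl⟩ : ∃ e, d = e + 1 := ⟨d - 1, by omega⟩
  rw [← List.map_reverse, List.map_map, pv_reverse_range_map, pv_slice_inner]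
  rw [List.range_succ_eq_map]
  simp only [List.map_cons, List.tail_cons, List.map_map]
  rw [List.range_succ]
  simp only [List.map_append, List.map_cons, List.map_nil, List.dropLast_concat,
    Nat.add_sub_cancel]
  apply List.map_congr_left
  intro i hi
  simp only [List.mem_range] at hi
  simp only [Function.comp]
  congr 1
  omega

-- ===== VERDICT (by name: the statement is the Claim_ definition above) =====
theorem spiral_boundary_spec : Claim_equal_spiral_boundary := by
  intro M n level _ _
  unfold Spec_spiral_boundary spiral_boundary spiral_boundary_alt
  by_cases h1 : n = 1
  · simp only [if_pos h1]
  by_cases h2 : PySem.Int.mod n 2 = 1 ∧ level = PySem.Int.floordiv n 2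
  · simp only [if_neg h1, if_pos h2]
  simp only [if_neg h1, if_neg h2]
  by_cases hcmp : n - level - 1 < level
  · -- empty ring: both sides are []
    have hr : PySem.List.pyRange level (n - level - 1 + 1) 1 = [] :=
      PySem.List.pyRange_one_eq_nil (by omega)
    have hfuel : (4 * (n - level - 1 - level)).toNat = 0 := by omega
    rw [hfuel, hr]
    simp [pvWalk, PySem.List.slice]
  · have hne : n - level - 1 ≠ level := fun he => h2 (pv_lo_hi_guard n level he)
    have hlh : level < n - level - 1 := by omega
    obtain ⟨d, hd⟩ : ∃ d : Nat, (n - level - 1 - level).toNat = d := ⟨_, rfl⟩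
    have hd1 : 1 ≤ d := by omega
    have hhid : n - level - 1 = level + (d : Int) := by omega
    have hfuel : (4 * (n - level - 1 - level)).toNat = 4 * d := by omega
    have hcnt : (level + (d : Int) + 1 - level).toNat = d + 1 := by omega
    have hrange : PySem.List.pyRange level (level + (d : Int) + 1) 1 =
        (List.range (d + 1)).map (fun k : Nat => level + (k : Int)) := by
      rw [PySem.List.pyRange_one, hcnt]
    rw [hfuel, hhid, pvWalk_ring M level d hd1, hrange]
    rw [pv_top M level d, pv_right M level d hd1, pv_bot M level d hd1, pv_left M level d hd1]
    simp [List.append_assoc]
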